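-- pv_equiv track=rewrite | github.com/hypergraphman/AnnaEGE24 | task23/1.py | f
-- ===== SOURCE A (Python) =====
-- def f(s, e, h):
--     if s > e:
--         return 0
--     if s == e:
--         if h[-2] == '2' or h[-2] == '3':
--             return 1
--         else:
--             return 0
--     m = [f(s + 1, e, h + '1'), f(s * 2, e, h + '2'), f(s * 3, e, h + '3')]
--     return sum(m)
-- ===== SOURCE B (Python) =====
-- def f(s, e, h):
--     # Iterative bottom-up DP over v in [s, e): dp[v] = (count when the previous
--     # op is not *2/*3, count when it is): a different, non-recursive algorithm.
--     if s > e: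
--         return 0
--     if s == e:
--         return 1 if h[-2] in ('2', '3') else 0
--     dp = {}
--     for v in range(e - 1, s - 1, -1):
--         g0 = 0
--         hits = 0
--         for t, op23 in ((v + 1, False), (v * 2, True), (v * 3, True)):
--             if t == e:
--                 hits += 1
--             elif t < e:
--                 c0, c1 = dp.get(t, (0, 0))
--                 g0 += c1 if op23 else c0
--         dp[v] = (g0, g0 + hits)
--     c0, c1 = dp[s]
--     return c1 if h and h[-1] in ('2', '3') else c0
-- ===== Notes on version B (the rewrite author's own statement) =====
-- stated objective: alternative
-- what changed: Replaces A's three-way recursion over growing history strings by an iterative bottom-up DP filling a table dp[v] = (paths from v whose incoming op is not *2/*3, paths whose incoming op is) for v from e-1 down to s; only the last history character matters, so the answer is read off dp[s].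
import Mathlib
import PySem

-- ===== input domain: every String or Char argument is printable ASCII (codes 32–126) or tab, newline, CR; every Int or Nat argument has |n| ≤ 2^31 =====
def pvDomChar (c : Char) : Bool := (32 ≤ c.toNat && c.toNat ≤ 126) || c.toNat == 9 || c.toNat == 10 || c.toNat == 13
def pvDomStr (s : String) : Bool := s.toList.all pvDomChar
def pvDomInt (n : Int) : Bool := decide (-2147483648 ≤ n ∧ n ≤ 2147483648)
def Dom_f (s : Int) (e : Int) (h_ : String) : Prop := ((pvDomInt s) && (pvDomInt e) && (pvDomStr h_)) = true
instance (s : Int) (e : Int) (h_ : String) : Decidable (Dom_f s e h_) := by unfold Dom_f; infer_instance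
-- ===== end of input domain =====

-- B replaces A's three-way recursion over growing history strings by an iterative bottom-up
-- DP table over [s, e) (objective: alternative algorithm).

-- ===== PORT A =====
-- A's recursion, fuel-guarded only for totality: inside Pre_f every operation increases the value
-- by at least 1, so the recursion depth is at most e - s and the fuel below never runs out.
-- The `none` branch of h[-2] is where Python raises IndexError (excluded by Pre_f).
def fAux : Nat → Int → Int → List Char → Int
  | 0, _, _, _ => 0
  | n + 1, s, e, h =>
    if s > e then 0
    else if s = e then
      match PySem.List.pyGet? h (-2) with
      | some c => if c = '2' ∨ c = '3' then 1 else 0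
      | none => 0
    else
      fAux n (s + 1) e (h ++ ['1']) + (fAux n (s * 2) e (h ++ ['2']) + (fAux n (s * 3) e (h ++ ['3']) + 0))

def f (s : Int) (e : Int) (h_ : String) : Int := fAux ((e - s).toNat + 1) s e h_.toList

-- ===== PORT B =====
-- transliteration of Source B: the body of B's countdown loop (inner fold = the `for t, op23 in …` loop) …
def fAltStep (e : Int) (dp : PySem.Dict Int (Int × Int)) (v : Int) : PySem.Dict Int (Int × Int) :=
  let gh := [((v + 1 : Int), false), (v * 2, true), (v * 3, true)].foldl
    (fun (p : Int × Int) tc =>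
      if tc.1 = e then (p.1, p.2 + 1)
      else if tc.1 < e then
        let c := dp.getD tc.1 (0, 0)
        (p.1 + (if tc.2 then c.2 else c.1), p.2)
      else p) (0, 0)
  dp.insert v (gh.1, gh.1 + gh.2)

-- … and the function: two base cases, the dp-building fold, two lookups.
def f_alt (s : Int) (e : Int) (h_ : String) : Int :=
  if s > e then 0
  else if s = e then
    match PySem.List.pyGet? h_.toList (-2) with
    | some c => if c = '2' ∨ c = '3' then 1 else 0
    | none => 0
  else
    let dp := (PySem.List.pyRange (e - 1) (s - 1) (-1)).foldl (fAltStep e) PySem.Dict.empty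
    let c := dp.getD s (0, 0)   -- dp[s]: the key is always present here (s < e); the default only totalizes
    match PySem.List.pyGet? h_.toList (-1) with
    | some ch => if ch = '2' ∨ ch = '3' then c.2 else c.1
    | none => c.1               -- `h and h[-1] in ('2','3')` is False for empty h

-- ===== PRECONDITION & SPEC =====
-- Pre_f is exactly where Python A returns: A raises IndexError when s == e with len(h) < 2, or when
-- s < e, len(h) == 0 and a single operation already reaches e; and it recurses forever
-- (RecursionError) when s ≤ 0 < e - s, because the *2 branch then never grows past e.
def Pre_f (s : Int) (e : Int) (h_ : String) : Prop :=
  s > e ∨ (s = e ∧ 2 ≤ h_.toList.length) ∨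
    (1 ≤ s ∧ s < e ∧ (1 ≤ h_.toList.length ∨ (s + 1 ≠ e ∧ s * 2 ≠ e ∧ s * 3 ≠ e)))
instance (s : Int) (e : Int) (h_ : String) : Decidable (Pre_f s e h_) := by unfold Pre_f; infer_instance

def pvWitness_f : Int × Int × String := (2, 9, "12")

def Spec_f (s : Int) (e : Int) (h_ : String) (out : Int) : Prop := out = f_alt s e h_
instance (s : Int) (e : Int) (h_ : String) (out : Int) : Decidable (Spec_f s e h_ out) := by unfold Spec_f; infer_instance

-- ===== CLAIM (what is proved, stated in full; the proofs are below) =====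
def Claim_equal_f : Prop := ∀ (s : Int) (e : Int) (h_ : String), Dom_f s e h_ → Pre_f s e h_ → Spec_f s e h_ (f s e h_)

-- ===== LEMMAS AND PROOFS =====

-- The common mathematical kernel: G e v = (number of accepted continuations from v when the op that
-- produced v is not *2/*3, the same count when it is), for 1 ≤ v < e; (0, 0) elsewhere.
def G (e : Int) (v : Int) : Int × Int :=
  if hv : 1 ≤ v ∧ v < e then
    let a := if h1 : v + 1 < e then (G e (v + 1)).1 else 0
    let b := if h2 : v * 2 < e then (G e (v * 2)).2 else 0
    let c := if h3 : v * 3 < e then (G e (v * 3)).2 else 0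
    let g0 := a + b + c
    let hits := (if v + 1 = e then (1 : Int) else 0) + (if v * 2 = e then 1 else 0) + (if v * 3 = e then 1 else 0)
    (g0, g0 + hits)
  else (0, 0)
termination_by (e - v).toNat
decreasing_by all_goals omega

def mrg (o : Option Char) (p : Int × Int) : Int :=
  match o with
  | some c => if c = '2' ∨ c = '3' then p.2 else p.1
  | none => p.1

def chk (o : Option Char) : Int :=
  match o with
  | some c => if c = '2' ∨ c = '3' then 1 else 0
  | none => 0

lemma mrg_one (p : Int × Int) : mrg (some '1') p = p.1 := by simp [mrg]
lemma mrg_two (p : Int × Int) : mrg (some '2') p = p.2 := by simp [mrg]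
lemma mrg_three (p : Int × Int) : mrg (some '3') p = p.2 := by simp [mrg]

lemma G_eq (e v : Int) (h1 : 1 ≤ v) (h2 : v < e) :
    G e v = ((if v+1 < e then (G e (v+1)).1 else 0) + (if v*2 < e then (G e (v*2)).2 else 0) + (if v*3 < e then (G e (v*3)).2 else 0),
             (if v+1 < e then (G e (v+1)).1 else 0) + (if v*2 < e then (G e (v*2)).2 else 0) + (if v*3 < e then (G e (v*3)).2 else 0)
             + ((if v+1 = e then (1:Int) else 0) + (if v*2 = e then 1 else 0) + (if v*3 = e then 1 else 0))) := by
  rw [G, dif_pos ⟨h1, h2⟩]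
  rfl

lemma pyGet?_append_singleton_neg_two (h : List Char) (c : Char) :
    PySem.List.pyGet? (h ++ [c]) (-2) = PySem.List.pyGet? h (-1) := by
  rcases h with _ | ⟨x, xs⟩
  · rw [(PySem.List.pyGet?_eq_none_iff _ _).mpr, (PySem.List.pyGet?_eq_none_iff _ _).mpr]
    · simp [PySem.Raise.InRange]
    · simp [PySem.Raise.InRange]
  · rw [PySem.List.pyGet?_neg_ofNat _ 2 (by omega) (by simp), PySem.List.pyGet?_neg_one]
    rw [List.getElem?_append_left (by simp)]
    simp [List.getLast?_eq_getElem?]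

set_option maxHeartbeats 1000000 in
lemma fAux_eq (e : Int) : ∀ (n : Nat) (v : Int) (h : List Char), 1 ≤ v → (e - v).toNat < n →
    fAux n v e h =
      if e < v then 0
      else if v = e then chk (PySem.List.pyGet? h (-2))
      else mrg (PySem.List.pyGet? h (-1)) (G e v) := by
  intro n
  induction n with
  | zero => intro v h hv hf; omega
  | succ n ih =>
    intro v h hv hf
    have hunf : fAux (n+1) v e h =
        if v > e then 0
        else if v = e then chk (PySem.List.pyGet? h (-2))
        else fAux n (v+1) e (h ++ ['1']) + (fAux n (v*2) e (h ++ ['2']) + (fAux n (v*3) e (h ++ ['3']) + 0)) := rfl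
    by_cases hgt : e < v
    · rw [hunf, if_pos (by omega), if_pos hgt]
    · by_cases heq : v = e
      · rw [hunf, if_neg (by omega), if_pos heq, if_neg (by omega), if_pos heq]
      · have hlt : v < e := by omega
        have hn1 : 1 ≤ n := by omega
        rw [hunf, if_neg (by omega), if_neg heq, if_neg (by omega), if_neg heq]
        rw [ih (v+1) (h ++ ['1']) (by omega) (by omega),
            ih (v*2) (h ++ ['2']) (by omega) (by omega),
            ih (v*3) (h ++ ['3']) (by omega) (by omega)]
        rw [G_eq e v hv hlt]
        simp only [pyGet?_append_singleton_neg_two, PySem.List.pyGet?_neg_one_append_singleton,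
          mrg_one, mrg_two, mrg_three]
        rcases hc : PySem.List.pyGet? h (-1) with _ | c
        · simp only [mrg, chk]
          split_ifs <;> omega
        · simp only [mrg, chk]
          split_ifs <;> omega

set_option maxHeartbeats 1000000 in
lemma step_eq (e a : Int) (dp : PySem.Dict Int (Int × Int)) (ha1 : 1 ≤ a) (hae : a < e)
    (hinv : ∀ t, dp.get? t = if a < t ∧ t < e then some (G e t) else none) :
    fAltStep e dp a = dp.insert a (G e a) := by
  have gd : ∀ t, a < t → (dp.getD t (0, 0) = if t < e then G e t else (0, 0)) := by
    intro t ht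
    rw [PySem.Dict.getD_eq_get?_getD, hinv]
    by_cases hx : t < e
    · simp [hx, ht]
    · simp [hx]
  unfold fAltStep
  simp only [List.foldl_cons, List.foldl_nil]
  congr 1
  rw [G_eq e a ha1 hae]
  rw [gd (a+1) (by omega), gd (a*2) (by omega), gd (a*3) (by omega)]
  split_ifs <;> simp_all [Prod.ext_iff]

lemma foldl_inv (e b : Int) (hb : 0 ≤ b) : ∀ (n : Nat), ∀ (a : Int) (dp : PySem.Dict Int (Int × Int)),
    a = b + n → a ≤ e - 1 →
    (∀ t, dp.get? t = if a < t ∧ t < e then some (G e t) else none) →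
    ∀ t, ((PySem.List.pyRange a b (-1)).foldl (fAltStep e) dp).get? t
      = if b < t ∧ t < e then some (G e t) else none := by
  intro n
  induction n with
  | zero =>
    intro a dp han hae hinv t
    rw [PySem.List.pyRange_neg_one_eq_nil (by omega)]
    simpa [show a = b by omega] using hinv t
  | succ n ih =>
    intro a dp han hae hinv t
    rw [PySem.List.pyRange_neg_one_cons (by omega)]
    rw [List.foldl_cons]
    rw [step_eq e a dp (by omega) (by omega) hinv]
    refine ih (a - 1) _ (by omega) (by omega) ?_ t
    intro u
    rw [PySem.Dict.get?_insert]
    by_cases hu : u = a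
    · rw [if_pos hu, hu, if_pos (show a - 1 < a ∧ a < e from by omega)]
    · rw [if_neg hu, hinv u]
      by_cases h1 : a < u ∧ u < e
      · rw [if_pos h1, if_pos (by omega)]
      · by_cases h2 : a - 1 < u ∧ u < e
        · exfalso; exact hu (by omega)
        · rw [if_neg h1, if_neg h2]

theorem f_spec_aux : ∀ (s e : Int) (h_ : String), Pre_f s e h_ → f s e h_ = f_alt s e h_ := by
  intro s e h_ hpre
  by_cases hgt : s > e
  · have h0 : (e - s).toNat = 0 := by omega
    rw [f, h0, f_alt, if_pos hgt]
    show (if s > e then (0:Int) else _) = 0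
    rw [if_pos hgt]
  · by_cases heq : s = e
    · have h0 : (e - s).toNat = 0 := by omega
      rw [f, h0, f_alt, if_neg hgt, if_pos heq]
      show (if s > e then (0:Int) else if s = e then _ else _) = _
      rw [if_neg hgt, if_pos heq]
    · have hlt : s < e := by omega
      have hs1 : 1 ≤ s := by
        rcases hpre with h | h | h
        · omega
        · omega
        · exact h.1
      rw [f, fAux_eq e _ s _ hs1 (by omega)]
      rw [if_neg (by omega), if_neg heq]
      rw [f_alt, if_neg hgt, if_neg heq]
      have hinv := foldl_inv e (s - 1) (by omega) (e - s).toNat (e - 1) PySem.Dict.empty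
        (by omega) (by omega)
        (by intro t; rw [PySem.Dict.get?_empty, if_neg (by omega)])
      have hdp : ((PySem.List.pyRange (e - 1) (s - 1) (-1)).foldl (fAltStep e) PySem.Dict.empty).getD s (0, 0) = G e s := by
        rw [PySem.Dict.getD_eq_get?_getD, hinv s, if_pos ⟨by omega, hlt⟩]
        rfl
      simp only [hdp]
      rcases hc : PySem.List.pyGet? h_.toList (-1) with _ | c
      · simp [mrg]
      · simp [mrg]

-- ===== VERDICT (by name: the statement is the Claim_ definition above) =====
theorem f_spec : Claim_equal_f := by
  intro s e h_ _ hpre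
  unfold Spec_f
  exact f_spec_aux s e h_ hpre
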